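-- pv_equiv track=rewrite | github.com/Ercys38/R107 | TP5/exo6tp5.py | indice_premiere_occurrence
-- ===== SOURCE A (Python) =====
-- def taille_chaine(chaine):
--     """Retourne la taille de la chaîne en comptant caractère par caractère."""
--     compteur = 0
--     for _ in chaine:
--         compteur += 1
--     return compteur
--
-- def indice_premiere_occurrence(chaine, motif):
--     """
--     Retourne l'indice de début de la première occurrence de 'motif' dans 'chaine'
--     ou -1 si le motif n'est pas trouvé.
--     (Équivalent simplifié de find, mais fait à la main.)
--     """
--     n = taille_chaine(chaine)
--     m = taille_chaine(motif)
--
--     if m == 0 or m > n: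
--         return -1
--
--
--     for i in range(n - m + 1):
--
--         j = 0
--         while j < m and chaine[i + j] == motif[j]:
--             j += 1
--         if j == m:
--             return i
--     return -1
-- ===== SOURCE B (Python) =====
-- def indice_premiere_occurrence(chaine, motif):
--     """
--     Retourne l'indice de début de la première occurrence de 'motif' dans 'chaine'
--     ou -1 si le motif n'est pas trouvé (un motif vide est considéré absent,
--     comme dans le contrat de A).
--     """
--     if not motif:
--         return -1
--     return chaine.find(motif)
-- ===== Notes on version B (the rewrite author's own statement) =====
-- stated objective: faster
-- what changed: Replaces the hand-written length counter and nested character-by-character scan with a single call to str.find (CPython's C-implemented two-way string search), keeping A's explicit 'empty pattern is absent' rule.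
import Mathlib
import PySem

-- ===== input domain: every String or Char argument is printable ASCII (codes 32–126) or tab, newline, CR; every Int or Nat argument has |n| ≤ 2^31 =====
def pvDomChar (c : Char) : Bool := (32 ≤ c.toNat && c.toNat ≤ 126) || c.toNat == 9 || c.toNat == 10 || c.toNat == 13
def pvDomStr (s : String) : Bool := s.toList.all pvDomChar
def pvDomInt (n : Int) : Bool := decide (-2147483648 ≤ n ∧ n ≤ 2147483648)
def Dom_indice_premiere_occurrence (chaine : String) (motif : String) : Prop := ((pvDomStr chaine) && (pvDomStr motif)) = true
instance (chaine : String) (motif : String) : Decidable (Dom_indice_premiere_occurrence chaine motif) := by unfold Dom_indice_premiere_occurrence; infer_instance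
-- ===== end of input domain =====

-- B replaces A's hand-written length counter and nested character-by-character scan by a single
-- str.find call, keeping A's explicit 'empty pattern is absent' rule; same return value, proved below.

-- ===== PORT A =====
-- taille_chaine: count the characters one by one
def pvTaille (chaine : String) : Int := chaine.toList.foldl (fun c _ => c + 1) 0

-- the inner 'while j < m and chaine[i+j] == motif[j]: j += 1'
-- (in every reachable state the indices i+j and j are in range, so getD is exact there)
def pvWhile (s p : List Char) (i m j : Nat) : Nat :=
  if j < m ∧ s.getD (i + j) 'a' = p.getD j 'a' then pvWhile s p i m (j + 1) else j
termination_by m - j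
decreasing_by omega

-- the outer 'for i in range(n - m + 1)' with its early return
def pvLoop (s p : List Char) (m : Nat) : List Nat → Int
  | [] => -1
  | i :: rest => if pvWhile s p i m 0 = m then (i : Int) else pvLoop s p m rest

def indice_premiere_occurrence (chaine : String) (motif : String) : Int :=
  let n := pvTaille chaine
  let m := pvTaille motif
  if m = 0 ∨ m > n then -1
  else pvLoop chaine.toList motif.toList m.toNat (List.range ((n - m + 1).toNat))

-- ===== PORT B =====
def indice_premiere_occurrence_alt (chaine : String) (motif : String) : Int :=
  if motif = "" then -1 else PySem.Str.find chaine motif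

-- ===== PRECONDITION & SPEC =====
def Spec_indice_premiere_occurrence (chaine : String) (motif : String) (out : Int) : Prop := out = indice_premiere_occurrence_alt chaine motif
instance (chaine : String) (motif : String) (out : Int) : Decidable (Spec_indice_premiere_occurrence chaine motif out) := by unfold Spec_indice_premiere_occurrence; infer_instance

-- ===== CLAIM (what is proved, stated in full; the proofs are below) =====
def Claim_equal_indice_premiere_occurrence : Prop := ∀ (chaine : String) (motif : String), Dom_indice_premiere_occurrence chaine motif → Spec_indice_premiere_occurrence chaine motif (indice_premiere_occurrence chaine motif)

-- ===== LEMMAS AND PROOFS =====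

theorem pvTaille_eq (chaine : String) : pvTaille chaine = (chaine.toList.length : Int) := by
  have h : ∀ (l : List Char) (a : Int), l.foldl (fun c _ => c + 1) a = a + l.length := by
    intro l
    induction l with
    | nil => simp
    | cons x xs ih => intro a; simp [List.foldl, ih]; ring
  simpa using h chaine.toList 0

-- the inner while loop reaches m exactly when all m characters at offset i match
theorem pvWhile_eq_iff (s p : List Char) (i m : Nat) :
    ∀ (d j : Nat), m - j = d → j ≤ m →
      (pvWhile s p i m j = m ↔ ∀ k, j ≤ k → k < m → s.getD (i + k) 'a' = p.getD k 'a') := by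
  intro d
  induction d with
  | zero =>
      intro j hd hj
      have hjm : j = m := by omega
      rw [pvWhile]
      subst hjm
      simp only [lt_self_iff_false, false_and, if_false]
      constructor
      · intro _ k hk1 hk2; omega
      · intro _; trivial
  | succ c ih =>
      intro j hd hj
      have hjm : j < m := by omega
      rw [pvWhile]
      by_cases hc : s.getD (i + j) 'a' = p.getD j 'a'
      · rw [if_pos ⟨hjm, hc⟩]
        rw [ih (j + 1) (by omega) (by omega)]
        constructor
        · intro h k hk1 hk2
          rcases Nat.eq_or_lt_of_le hk1 with he | hl
          · subst he; exact hc
          · exact h k hl hk2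
        · intro h k hk1 hk2
          exact h k (by omega) hk2
      · rw [if_neg (by tauto)]
        constructor
        · intro h; omega
        · intro h; exact absurd (h j le_rfl hjm) hc

theorem prefix_drop_iff (s p : List Char) (i : Nat) (h : i + p.length ≤ s.length) :
    (p <+: s.drop i ↔ ∀ k, 0 ≤ k → k < p.length → s.getD (i + k) 'a' = p.getD k 'a') := by
  rw [List.prefix_iff_eq_take]
  constructor
  · intro he k _ hk
    have h1 : i + k < s.length := by omega
    rw [List.getD_eq_getElem s 'a' h1, List.getD_eq_getElem p 'a' hk]
    rw [List.getElem_of_eq he hk]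
    simp
  · intro he
    apply List.ext_getElem
    · simp; omega
    · intro k hk1 hk2
      have h1 : i + k < s.length := by omega
      have := he k (Nat.zero_le _) hk1
      rw [List.getD_eq_getElem s 'a' h1, List.getD_eq_getElem p 'a' hk1] at this
      simp [this]

theorem pvLoop_all_fail (s p : List Char) (m : Nat) :
    ∀ (cnt start : Nat), (∀ i, start ≤ i → i < start + cnt → pvWhile s p i m 0 ≠ m) →
      pvLoop s p m (List.range' start cnt) = -1 := by
  intro cnt
  induction cnt with
  | zero => intro start _; simp [pvLoop]
  | succ c ih =>
      intro start hfail
      have h0 : pvWhile s p start m 0 ≠ m := hfail start le_rfl (by omega)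
      simp only [List.range'_succ, pvLoop, if_neg h0]
      exact ih (start + 1) (fun i h1 h2 => hfail i (by omega) (by omega))

theorem pvLoop_finds (s p : List Char) (m : Nat) (q : Nat)
    (hP : pvWhile s p q m 0 = m) (hmin : ∀ i < q, pvWhile s p i m 0 ≠ m) :
    ∀ (cnt start : Nat), start ≤ q → q < start + cnt →
      pvLoop s p m (List.range' start cnt) = (q : Int) := by
  intro cnt
  induction cnt with
  | zero => intro start h1 h2; omega
  | succ c ih =>
      intro start h1 h2
      by_cases hs : start = q
      · subst hs; simp [List.range'_succ, pvLoop, hP]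
      · have hne : pvWhile s p start m 0 ≠ m := hmin start (by omega)
        simp only [List.range'_succ, pvLoop, if_neg hne]
        exact ih (start + 1) (by omega) (by omega)

theorem no_occ_no_prefix (s p : List Char) (h : ¬ p <:+: s) (j : Nat) : ¬ p <+: s.drop j := by
  intro hp
  have := (PySem.Chars.exists_prefix_drop_iff_isIn p s).mp ⟨j, hp⟩
  rw [PySem.Chars.isIn_iff_infix] at this
  exact h this

-- ===== VERDICT (by name: the statement is the Claim_ definition above) =====
theorem indice_premiere_occurrence_spec : Claim_equal_indice_premiere_occurrence := by
  intro chaine motif _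
  unfold Spec_indice_premiere_occurrence indice_premiere_occurrence indice_premiere_occurrence_alt
  rw [pvTaille_eq, pvTaille_eq]
  set s := chaine.toList with hs
  set p := motif.toList with hp
  set N := s.length with hN
  set M := p.length with hM
  by_cases hmt : motif = ""
  · have hM0 : M = 0 := by simp [hM, hp, hmt]
    simp [hmt, hM0]
  · have hpne : p ≠ [] := by
      intro h0
      exact hmt (by have := congrArg String.ofList h0; simpa [hp] using this)
    have hM1 : 1 ≤ M := List.length_pos_of_ne_nil hpne
    rw [if_neg hmt]
    have hfind : PySem.Str.find chaine motif = PySem.Chars.find s p := by simp [hs, hp]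
    rw [hfind]
    by_cases hle : M ≤ N
    · -- pattern not longer than the text: A runs its outer loop
      rw [if_neg (by omega)]
      have htn : (((N : Int) - (M : Int) + 1)).toNat = N - M + 1 := by omega
      have htm : ((M : Int)).toNat = M := by omega
      rw [htm, htn, List.range_eq_range']
      -- characterisation of the inner while loop on in-range starts
      have hPiff : ∀ i, i + M ≤ N → (pvWhile s p i M 0 = M ↔ p <+: s.drop i) := by
        intro i hi
        rw [pvWhile_eq_iff s p i M M 0 (by omega) (by omega), prefix_drop_iff s p i (by omega)]
      by_cases hocc : PySem.Chars.find s p = -1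
      · -- no occurrence: both sides return -1
        rw [hocc]
        have hninf : ¬ p <:+: s := (PySem.Chars.find_eq_neg_one_iff s p).mp hocc
        apply pvLoop_all_fail
        intro i _ hi2 hP
        exact no_occ_no_prefix s p hninf i ((hPiff i (by omega)).mp hP)
      · -- an occurrence: the loop stops exactly at the first occurrence index
        have hnn : 0 ≤ PySem.Chars.find s p := by
          rw [PySem.Chars.find_nonneg_iff]
          exact (PySem.Chars.find_ne_neg_one_iff s p).mp hocc
        obtain ⟨hpre, hmin⟩ := PySem.Chars.find_spec hnn
        set q := (PySem.Chars.find s p).toNat with hq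
        have hlen : M ≤ N - q := by
          have := hpre.length_le
          simpa [hM] using this
        have hqN : q + M ≤ N := by
          rcases Nat.le_total q N with h | h
          · omega
          · have : N - q = 0 := by omega
            omega
        have hP : pvWhile s p q M 0 = M := (hPiff q hqN).mpr hpre
        have hMin : ∀ i < q, pvWhile s p i M 0 ≠ M := by
          intro i hi hPi
          exact hmin i hi ((hPiff i (by omega)).mp hPi)
        rw [pvLoop_finds s p M q hP hMin (N - M + 1) 0 (by omega) (by omega)]
        omega
    · -- pattern longer than the text: A's guard fires, and find returns -1 too
      rw [if_pos (by right; omega)]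
      rw [(PySem.Chars.find_eq_neg_one_iff s p).mpr (fun hinf => by have := hinf.length_le; omega)]
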